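-- pv_equiv track=rewrite | github.com/bssrdf/pyleet | NumberofUniqueFlavorsAfterSharingKCandies.py | maxUniqueCandies
-- ===== SOURCE A (Python) =====
-- from typing import List
-- from collections import Counter, defaultdict
--
-- def maxUniqueCandies(candies: List[int], k: int) -> int:
--     count = Counter(candies)
--     ans = 0
--     for i,c in enumerate(candies): # Give out candies in window `[i-k+1, i]`
--         count[c] -= 1 # Give out `A[i]`
--         if i-k >= 0 :
--             count[candies[i-k]] += 1 # Reclaim `A[i-k]`
--         if count[c] == 0:
--             count.pop(c)
--         if i >= k-1: ans = max(ans, len(count)) # Take the maximum possible unique flavors left after giving out.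
--     return ans
-- ===== SOURCE B (Python) =====
-- def maxUniqueCandies(candies, k):
--     # Offline algorithm: flavor c is fully given out exactly in the windows ending at
--     # i with last[c] <= i <= first[c] + k - 1.  Mark those index intervals in a
--     # difference array and sweep once, maximizing D - (intervals covering i).
--     n = len(candies)
--     if n == 0:
--         return 0
--     first = {}
--     last = {}
--     for i, c in enumerate(candies):
--         if c not in first:
--             first[c] = i
--         last[c] = i
--     D = len(first)
--     diff = [0] * (n + 1)
--     for c in first:
--         lo = last[c]
--         hi = first[c] + k - 1
--         if hi >= lo:
--             diff[lo] += 1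
--             if hi + 1 <= n:
--                 diff[hi + 1] -= 1
--     best = 0
--     removed = 0
--     for i in range(n):
--         removed += diff[i]
--         if i >= k - 1:
--             best = max(best, D - removed)
--     return best
-- ===== Notes on version B (the rewrite author's own statement) =====
-- stated objective: alternative
-- what changed: B is an offline staged algorithm: it records each flavor's first/last occurrence, marks the interval of window-end indices in which that flavor is fully given out in a difference array, and takes the max of D minus a prefix-sum sweep, instead of A's online sliding-window Counter with pop-on-zero and len() per step.
import Mathlib
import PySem

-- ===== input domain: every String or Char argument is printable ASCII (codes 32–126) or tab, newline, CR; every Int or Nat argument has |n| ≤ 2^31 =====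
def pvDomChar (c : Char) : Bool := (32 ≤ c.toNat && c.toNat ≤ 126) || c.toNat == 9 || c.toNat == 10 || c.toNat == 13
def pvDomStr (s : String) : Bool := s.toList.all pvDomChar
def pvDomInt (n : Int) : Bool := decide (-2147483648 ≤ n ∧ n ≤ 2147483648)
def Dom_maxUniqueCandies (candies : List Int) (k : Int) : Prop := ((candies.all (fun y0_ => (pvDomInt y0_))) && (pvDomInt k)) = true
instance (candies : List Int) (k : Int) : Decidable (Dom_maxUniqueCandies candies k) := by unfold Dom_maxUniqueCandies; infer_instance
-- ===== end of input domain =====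

-- B replaces A's online sliding-window Counter by an offline staged algorithm
-- (first/last occurrence per flavor, a difference array of fully-consumed intervals,
-- one prefix-sum sweep); objective: alternative (same O(n) cost, different algorithm).

-- ===== PORT A =====
-- loop body of A's `for i, c in enumerate(candies)`
def stepA (candies : List Int) (k : Int) (st : PySem.Dict Int Int × Int) (p : Int × Int) :
    PySem.Dict Int Int × Int :=
  let count := st.1
  let ans := st.2
  let i := p.1
  let c := p.2
  let count := count.insert c (count.getD c 0 - 1)                    -- count[c] -= 1
  let count :=
    if i - k ≥ 0 then
      let e := PySem.List.pyGetD candies (i - k) 0                    -- candies[i-k]; in range under Pre_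
      count.insert e (count.getD e 0 + 1)                             -- count[candies[i-k]] += 1
    else count
  let count := if count.getD c 0 = 0 then count.erase c else count    -- if count[c]==0: count.pop(c)
  let ans := if i ≥ k - 1 then max ans (count.size : Int) else ans    -- ans = max(ans, len(count))
  (count, ans)

def maxUniqueCandies (candies : List Int) (k : Int) : Int :=
  ((PySem.List.enumerate candies).foldl (stepA candies k) (PySem.Dict.counter candies, 0)).2

-- ===== PORT B =====
-- loop body of B's first loop: record first and last occurrence index of each flavor
def flStep (st : PySem.Dict Int Int × PySem.Dict Int Int) (p : Int × Int) :
    PySem.Dict Int Int × PySem.Dict Int Int :=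
  let i := p.1
  let c := p.2
  let first := if st.1.contains c then st.1 else st.1.insert c i      -- if c not in first: first[c] = i
  (first, st.2.insert c i)                                            -- last[c] = i

-- loop body of B's second loop: mark interval [last[c], first[c]+k-1] in the diff array
def diffStep (k n : Int) (first last : PySem.Dict Int Int) (diff : List Int) (c : Int) :
    List Int :=
  let lo := last.getD c 0
  let hi := first.getD c 0 + k - 1
  if hi ≥ lo then
    let diff := PySem.List.pySetD diff lo (PySem.List.pyGetD diff lo 0 + 1)     -- diff[lo] += 1 (lo in range: an index of candies)
    if hi + 1 ≤ n then
      PySem.List.pySetD diff (hi + 1) (PySem.List.pyGetD diff (hi + 1) 0 - 1)   -- diff[hi+1] -= 1 (in range: 1 ≤ hi+1 ≤ n)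
    else diff
  else diff

-- loop body of B's sweep `for i in range(n)`
def sweepStep (k D : Int) (diff : List Int) (st : Int × Int) (i : Int) : Int × Int :=
  let removed := st.1 + PySem.List.pyGetD diff i 0                    -- removed += diff[i] (0 ≤ i < n in range)
  let best := if i ≥ k - 1 then max st.2 (D - removed) else st.2
  (removed, best)

def maxUniqueCandies_alt (candies : List Int) (k : Int) : Int :=
  let n : Int := (candies.length : Int)
  if n = 0 then 0
  else
    let fl := (PySem.List.enumerate candies).foldl flStep (PySem.Dict.empty, PySem.Dict.empty)
    let D : Int := (fl.1.size : Int)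
    let diff := fl.1.keys.foldl (diffStep k n fl.1 fl.2) (List.replicate (candies.length + 1) 0)
    ((PySem.List.pyRange 0 n 1).foldl (sweepStep k D diff) (0, 0)).2

-- ===== PRECONDITION & SPEC =====
-- Pre_ excludes k < 0 with a nonempty list: there A indexes candies[i-k] past the end and raises IndexError.
def Pre_maxUniqueCandies (candies : List Int) (k : Int) : Prop := 0 ≤ k ∨ candies = []
instance (candies : List Int) (k : Int) : Decidable (Pre_maxUniqueCandies candies k) := by
  unfold Pre_maxUniqueCandies; infer_instance
def pvWitness_maxUniqueCandies : List Int × Int := ([1, 2, 1, 3, 2], 2)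

def Spec_maxUniqueCandies (candies : List Int) (k : Int) (out : Int) : Prop :=
  out = maxUniqueCandies_alt candies k
instance (candies : List Int) (k : Int) (out : Int) : Decidable (Spec_maxUniqueCandies candies k out) := by
  unfold Spec_maxUniqueCandies; infer_instance

-- ===== CLAIM (what is proved, stated in full; the proofs are below) =====
def Claim_equal_maxUniqueCandies : Prop := ∀ (candies : List Int) (k : Int),
  Dom_maxUniqueCandies candies k → Pre_maxUniqueCandies candies k →
  Spec_maxUniqueCandies candies k (maxUniqueCandies candies k)

-- ===== LEMMAS AND PROOFS =====

-- window after m processed steps of A: positions max(0, m-K) .. m-1  (K = k.toNat)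
def winCnt (candies : List Int) (K m : Nat) (x : Int) : Nat :=
  ((candies.take m).drop (m - K)).count x

-- number of flavors every candy of which lies in the current window
def remCnt (candies : List Int) (K m : Nat) : Nat :=
  (candies.toFinset.filter (fun x => candies.count x ≤ winCnt candies K m x)).card

-- A-side invariant: count is "total minus window", zero values popped
def InvA (candies : List Int) (K m : Nat) (count : PySem.Dict Int Int) : Prop :=
  count.keys.Nodup ∧
  (∀ x : Int, count.getD x 0 = (candies.count x : Int) - (winCnt candies K m x : Int)) ∧
  (∀ x : Int, x ∈ count.keys ↔ winCnt candies K m x < candies.count x)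

-- B-side: the first/last dicts after scanning the first m candies
def FLInv (candies : List Int) (m : Nat) (first last : PySem.Dict Int Int) : Prop :=
  first.keys.Nodup ∧
  (∀ x : Int, x ∈ first.keys ↔ x ∈ candies.take m) ∧
  (∀ x ∈ candies.take m, ∃ j : Nat, first.getD x 0 = (j : Int) ∧
    candies[j]? = some x ∧ (candies.take j).count x = 0) ∧
  (∀ x ∈ candies.take m, ∃ j : Nat, j < m ∧ last.getD x 0 = (j : Int) ∧
    candies[j]? = some x ∧ ((candies.take m).drop (j + 1)).count x = 0)

-- B-side: the first/last dicts after the whole scan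
def FLFinal (candies : List Int) (first last : PySem.Dict Int Int) : Prop :=
  first.keys.Nodup ∧
  (∀ x : Int, x ∈ first.keys ↔ x ∈ candies) ∧
  (∀ x ∈ candies, ∃ j : Nat, first.getD x 0 = (j : Int) ∧
    candies[j]? = some x ∧ (candies.take j).count x = 0) ∧
  (∀ x ∈ candies, ∃ j : Nat, last.getD x 0 = (j : Int) ∧
    candies[j]? = some x ∧ (candies.drop (j + 1)).count x = 0)

-- ---------- window / remaining-count arithmetic (shared characterization) ----------

lemma winCnt_le (candies : List Int) (K m : Nat) (x : Int) :
    winCnt candies K m x ≤ candies.count x := by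
  exact List.Sublist.count_le x ((List.drop_sublist _ _).trans (List.take_sublist _ _))

lemma winCnt_zero (candies : List Int) (K : Nat) (x : Int) : winCnt candies K 0 x = 0 := by
  simp [winCnt]

lemma winCnt_succ_small (candies : List Int) (K m : Nat) (hm : m < candies.length)
    (hK : m < K) (x : Int) :
    winCnt candies K (m + 1) x = winCnt candies K m x + (if candies[m] = x then 1 else 0) := by
  unfold winCnt
  have h0 : m - K = 0 := by omega
  have h1 : m + 1 - K = 0 := by omega
  rw [h0, h1, List.drop_zero, List.drop_zero, List.take_add_one,
    List.getElem?_eq_getElem hm, Option.toList_some, List.count_append, List.count_singleton]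
  simp only [beq_iff_eq]

lemma winCnt_succ_big (candies : List Int) (K m : Nat) (hm : m < candies.length)
    (hK : K ≤ m) (x : Int) :
    winCnt candies K m x + (if candies[m] = x then 1 else 0)
      = winCnt candies K (m + 1) x + (if candies[m - K]'(by omega) = x then 1 else 0) := by
  unfold winCnt
  have e1 : (candies.take (m + 1)).drop (m - K)
      = (candies.take m).drop (m - K) ++ [candies[m]] := by
    rw [List.take_add_one, List.getElem?_eq_getElem hm, Option.toList_some,
      List.drop_append_of_le_length (by simp; omega)]
  have hlt : m - K < (candies.take (m + 1)).length := by simp; omega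
  have e2 : (candies.take (m + 1)).drop (m - K)
      = candies[m - K]'(by omega) :: (candies.take (m + 1)).drop (m - K + 1) := by
    rw [List.drop_eq_getElem_cons hlt, List.getElem_take]
  have e3 : m - K + 1 = m + 1 - K := by omega
  rw [e3] at e2
  have := congrArg (List.count x) (e1.symm.trans e2)
  simp only [List.count_append, List.count_cons, List.count_nil, beq_iff_eq] at this ⊢
  split_ifs at this ⊢ <;> omega

lemma winCnt_lt_at (candies : List Int) (K m : Nat) (hm : m < candies.length) :
    winCnt candies K m (candies[m]) < candies.count (candies[m]) := by
  have h1 : winCnt candies K m (candies[m]) ≤ (candies.take m).count (candies[m]) :=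
    List.Sublist.count_le _ (List.drop_sublist _ _)
  have h2 : candies.count (candies[m])
      = (candies.take m).count (candies[m]) + (candies.drop m).count (candies[m]) := by
    rw [← List.count_append, List.take_append_drop]
  have h3 : 0 < (candies.drop m).count (candies[m]) := by
    rw [List.count_pos_iff, List.drop_eq_getElem_cons hm]
    exact List.mem_cons_self
  omega

lemma winCnt_pos_evict (candies : List Int) (K m : Nat) (hm : m < candies.length)
    (hK : K ≤ m) (hK1 : 1 ≤ K) :
    1 ≤ winCnt candies K m (candies[m - K]'(by omega)) := by
  have hlt : m - K < (candies.take m).length := by simp; omega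
  unfold winCnt
  rw [Nat.one_le_iff_ne_zero, ← Nat.pos_iff_ne_zero, List.count_pos_iff,
    List.drop_eq_getElem_cons hlt, List.getElem_take]
  exact List.mem_cons_self

lemma winCnt_succ_big_stable (candies : List Int) (K m : Nat) (hm : m < candies.length)
    (hK : K ≤ m) (he : candies[m - K]'(by omega) = candies[m]) (x : Int) :
    winCnt candies K (m + 1) x = winCnt candies K m x := by
  have := winCnt_succ_big candies K m hm hK x
  rw [he] at this
  split_ifs at this <;> omega

-- ---------- PySem.Dict helper lemmas ----------

lemma dict_get?_erase (d : PySem.Dict Int Int) (c x : Int) :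
    (d.erase c).get? x = if x = c then none else d.get? x := by
  obtain ⟨l⟩ := d
  show ((l.filter (fun p => !(p.1 == c))).find? (fun p => p.1 == x)).map (·.2)
      = if x = c then none else (l.find? (fun p => p.1 == x)).map (·.2)
  induction l with
  | nil => simp
  | cons a l ih =>
    by_cases hac : a.1 = c
    · have hfa : (!(a.1 == c)) = false := by simp [hac]
      by_cases hax : a.1 = x
      · have hxc : x = c := by omega
        subst hxc
        rw [List.filter_cons, hfa]
        simp only [Bool.false_eq_true, if_false]
        rw [ih]
        simp
      · have hxc : ¬ x = c := by omega
        rw [List.filter_cons, hfa]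
        simp only [Bool.false_eq_true, if_false]
        rw [ih, if_neg hxc, if_neg hxc, List.find?_cons_of_neg (by simp [hax])]
    · have hfa : (!(a.1 == c)) = true := by simp [hac]
      by_cases hax : a.1 = x
      · have hxc : ¬ x = c := by omega
        rw [List.filter_cons, hfa, if_pos rfl, List.find?_cons_of_pos (by simp [hax]),
          if_neg hxc, List.find?_cons_of_pos (by simp [hax])]
      · rw [List.filter_cons, hfa, if_pos rfl, List.find?_cons_of_neg (by simp [hax]),
          List.find?_cons_of_neg (by simp [hax]), ih]

lemma dict_getD_erase (d : PySem.Dict Int Int) (c x : Int) :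
    (d.erase c).getD x 0 = if x = c then 0 else d.getD x 0 := by
  rw [PySem.Dict.getD_eq_get?_getD, PySem.Dict.getD_eq_get?_getD, dict_get?_erase]
  split_ifs <;> rfl

lemma dict_keys_erase (d : PySem.Dict Int Int) (c : Int) :
    (d.erase c).keys = d.keys.filter (fun x => !(x == c)) := by
  obtain ⟨l⟩ := d
  show (l.filter (fun p => !(p.1 == c))).map (·.1) = (l.map (·.1)).filter (fun x => !(x == c))
  induction l with
  | nil => simp
  | cons a l ih => by_cases hac : a.1 = c <;> simp [List.filter_cons, hac, ih]

lemma dict_size_eq_keys_length (d : PySem.Dict Int Int) : d.size = d.keys.length := by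
  simp [PySem.Dict.size, PySem.Dict.keys]

lemma dict_insert_self_eq (d : PySem.Dict Int Int) (c : Int) (hnd : d.keys.Nodup)
    (hc : d.contains c = true) : d.insert c (d.getD c 0) = d := by
  apply PySem.Dict.ext
  rw [PySem.Dict.items_insert_of_contains d _ hc]
  conv_rhs => rw [← List.map_id d.items]
  apply List.map_congr_left
  intro p hp
  by_cases hpc : p.1 = c
  · have hmem : (c, p.2) ∈ d.items := by rw [← hpc]; exact hp
    have := PySem.Dict.get?_of_mem_items d hmem hnd
    simp only [hpc, PySem.Dict.getD_eq_get?_getD, this, if_pos, beq_self_eq_true, if_true,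
      Option.getD_some, id]
    exact Prod.ext hpc.symm rfl
  · simp [hpc]

lemma size_from_inv (candies : List Int) (K m : Nat) (count : PySem.Dict Int Int)
    (h : InvA candies K m count) :
    (count.size : Int) = (candies.toFinset.card : Int) - (remCnt candies K m : Int) := by
  obtain ⟨hnd, hval, hmem⟩ := h
  have hset : count.keys.toFinset
      = candies.toFinset.filter (fun x => ¬ (candies.count x ≤ winCnt candies K m x)) := by
    ext a
    simp only [List.mem_toFinset, Finset.mem_filter, hmem]
    constructor
    · intro h
      have := winCnt_le candies K m a
      exact ⟨List.count_pos_iff.mp (by omega), by omega⟩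
    · rintro ⟨_, h⟩; omega
  have hsplit := Finset.filter_card_add_filter_neg_card_eq_card
    (s := candies.toFinset) (p := fun x => candies.count x ≤ winCnt candies K m x)
  rw [dict_size_eq_keys_length, ← List.toFinset_card_of_nodup hnd, hset]
  unfold remCnt
  push_cast
  omega

-- ---------- A's loop step: invariant preserved, answer updated by D - remCnt ----------

lemma stepA_preserve (candies : List Int) (k : Int) (hk : 0 ≤ k) (m : Nat)
    (hm : m < candies.length) (count : PySem.Dict Int Int) (ar : Int)
    (hA : InvA candies k.toNat m count) :
    InvA candies k.toNat (m + 1) (stepA candies k (count, ar) ((m : Int), candies[m])).1 ∧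
    (stepA candies k (count, ar) ((m : Int), candies[m])).2
      = if (m : Int) ≥ k - 1 then
          max ar ((candies.toFinset.card : Int) - (remCnt candies k.toNat (m + 1) : Int))
        else ar := by
  obtain ⟨hndA, hval, hmemA⟩ := hA
  have hkk : (k.toNat : Int) = k := Int.toNat_of_nonneg hk
  have hcl := winCnt_lt_at candies k.toNat m hm
  have hwlec := winCnt_le candies k.toNat m candies[m]
  have h2 : (stepA candies k (count, ar) ((m : Int), candies[m])).2
      = if (m : Int) ≥ k - 1 then max ar ((stepA candies k (count, ar) ((m : Int), candies[m])).1.size : Int) else ar := by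
    simp only [stepA]
  suffices hA' : InvA candies k.toNat (m + 1) (stepA candies k (count, ar) ((m : Int), candies[m])).1 by
    refine ⟨hA', ?_⟩
    rw [h2, size_from_inv candies k.toNat (m + 1) _ hA']
  by_cases hcond : k.toNat ≤ m
  case pos =>
    have hif : ((m : Int) - k ≥ 0) := by omega
    obtain ⟨e, hedef⟩ : ∃ y, y = candies[m - k.toNat]'(by omega) := ⟨_, rfl⟩
    have hgete : PySem.List.pyGetD candies ((m : Int) - k) 0 = e := by
      rw [hedef, PySem.List.pyGetD_eq_getElem candies 0 (by omega) (by push_cast; omega)]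
      simp only [show ((m : Int) - k).toNat = m - k.toNat from by omega]
    have hwle_e := winCnt_le candies k.toNat m e
    have hbig : ∀ x, winCnt candies k.toNat m x + (if candies[m] = x then 1 else 0)
        = winCnt candies k.toNat (m + 1) x + (if e = x then 1 else 0) := by
      intro x
      have := winCnt_succ_big candies k.toNat m hm hcond x
      rw [← hedef] at this
      exact this
    by_cases hee : e = candies[m]
    -- evict, e = c
    · have hstab : ∀ x, winCnt candies k.toNat (m + 1) x = winCnt candies k.toNat m x := by
        apply winCnt_succ_big_stable candies k.toNat m hm hcond
        rw [← hedef]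
        exact hee
      have hcnt2 : ((count.insert candies[m] (count.getD candies[m] 0 - 1)).insert candies[m]
          ((count.insert candies[m] (count.getD candies[m] 0 - 1)).getD candies[m] 0 + 1)) = count := by
        rw [PySem.Dict.getD_insert_self, PySem.Dict.insert_insert_self]
        have harith : count.getD candies[m] 0 - 1 + 1 = count.getD candies[m] 0 := by ring
        rw [harith]
        apply dict_insert_self_eq count _ hndA
        rw [PySem.Dict.contains_iff_mem_keys, hmemA]
        omega
      simp only [stepA, if_pos hif, hgete, hee, hcnt2]
      have hnz : ¬ (count.getD candies[m] 0 = 0) := by rw [hval]; omega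
      rw [if_neg hnz]
      exact ⟨hndA, fun x => by rw [hval, hstab], fun x => by rw [hmemA, hstab]⟩
    -- evict, e ≠ c
    · have hK1 : 1 ≤ k.toNat := by
        by_contra hK0
        apply hee
        rw [hedef]
        congr 1
        omega
      have hel : 1 ≤ winCnt candies k.toNat m e := by
        have := winCnt_pos_evict candies k.toNat m hm hcond hK1
        rw [← hedef] at this
        exact this
      have hbc : winCnt candies k.toNat m candies[m] + 1 = winCnt candies k.toNat (m + 1) candies[m] := by
        have := hbig candies[m]
        rw [if_pos rfl, if_neg hee] at this
        omega
      have hbe : winCnt candies k.toNat (m + 1) e + 1 = winCnt candies k.toNat m e := by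
        have := hbig e
        rw [if_pos rfl, if_neg (fun h => hee h.symm)] at this
        omega
      have hbo : ∀ x, ¬ x = candies[m] → ¬ x = e →
          winCnt candies k.toNat (m + 1) x = winCnt candies k.toNat m x := by
        intro x h1 h2
        have := hbig x
        rw [if_neg (fun h => h1 h.symm), if_neg (fun h => h2 h.symm)] at this
        omega
      simp only [stepA, if_pos hif, hgete]
      have hpopc : ((count.insert candies[m] (count.getD candies[m] 0 - 1)).insert e
            ((count.insert candies[m] (count.getD candies[m] 0 - 1)).getD e 0 + 1)).getD
          candies[m] 0
          = (candies.count candies[m] : Int) - (winCnt candies k.toNat m candies[m] : Int) - 1 := by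
        rw [PySem.Dict.getD_insert, if_neg (fun h => hee h.symm), PySem.Dict.getD_insert_self, hval]
      rw [hpopc]
      by_cases hz : (candies.count candies[m] : Int) - (winCnt candies k.toNat m candies[m] : Int) - 1 = 0
      · rw [if_pos hz]
        refine ⟨?_, ?_, ?_⟩
        · rw [dict_keys_erase]
          exact List.Nodup.filter _ (PySem.Dict.nodup_keys_insert _ _ _ (PySem.Dict.nodup_keys_insert _ _ _ hndA))
        · intro x
          rw [dict_getD_erase]
          by_cases hxc : x = candies[m]
          · subst hxc
            rw [if_pos rfl]
            omega
          · rw [if_neg hxc, PySem.Dict.getD_insert]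
            by_cases hxe : x = e
            · rw [hxe, if_pos rfl, PySem.Dict.getD_insert, if_neg hee]
              simp only [hval]
              omega
            · rw [if_neg hxe, PySem.Dict.getD_insert, if_neg hxc]
              simp only [hval, hbo x hxc hxe]
        · intro x
          rw [dict_keys_erase, List.mem_filter]
          by_cases hxc : x = candies[m]
          · subst hxc
            simp only [beq_self_eq_true, Bool.not_true, Bool.false_eq_true, and_false, false_iff]
            omega
          · by_cases hxe : x = e
            · rw [hxe]
              simp only [PySem.Dict.mem_keys_insert]
              constructor
              · intro _
                omega
              · intro _
                refine ⟨by tauto, by simp [hee]⟩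
            · simp only [PySem.Dict.mem_keys_insert, hmemA]
              constructor
              · rintro ⟨(h | (h | h)), _⟩
                · exact absurd h hxe
                · exact absurd h hxc
                · rw [hbo x hxc hxe]; exact h
              · intro h
                rw [hbo x hxc hxe] at h
                exact ⟨Or.inr (Or.inr h), by simp [hxc]⟩
      · rw [if_neg hz]
        refine ⟨?_, ?_, ?_⟩
        · exact PySem.Dict.nodup_keys_insert _ _ _ (PySem.Dict.nodup_keys_insert _ _ _ hndA)
        · intro x
          rw [PySem.Dict.getD_insert]
          by_cases hxe : x = e
          · rw [hxe, if_pos rfl, PySem.Dict.getD_insert, if_neg hee]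
            simp only [hval]
            omega
          · rw [if_neg hxe, PySem.Dict.getD_insert]
            by_cases hxc : x = candies[m]
            · subst hxc
              rw [if_pos rfl]
              simp only [hval]
              omega
            · rw [if_neg hxc]
              simp only [hval, hbo x hxc hxe]
        · intro x
          by_cases hxc : x = candies[m]
          · subst hxc
            simp only [PySem.Dict.mem_keys_insert]
            constructor
            · intro _
              omega
            · intro _
              tauto
          · by_cases hxe : x = e
            · rw [hxe]
              simp only [PySem.Dict.mem_keys_insert]
              constructor
              · intro _
                omega
              · intro _
                tauto
            · simp only [PySem.Dict.mem_keys_insert, hmemA]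
              constructor
              · rintro (h | (h | h))
                · exact absurd h hxe
                · exact absurd h hxc
                · rw [hbo x hxc hxe]; exact h
              · intro h
                rw [hbo x hxc hxe] at h
                exact Or.inr (Or.inr h)
  -- no evict
  case neg =>
    have hmK : m < k.toNat := by omega
    have hif : ¬ ((m : Int) - k ≥ 0) := by omega
    have hw := winCnt_succ_small candies k.toNat m hm hmK
    simp only [stepA, if_neg hif]
    rw [PySem.Dict.getD_insert_self, hval]
    by_cases hz : (candies.count candies[m] : Int) - (winCnt candies k.toNat m candies[m] : Int) - 1 = 0
    · rw [if_pos hz]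
      refine ⟨?_, ?_, ?_⟩
      · rw [dict_keys_erase]
        exact List.Nodup.filter _ (PySem.Dict.nodup_keys_insert _ _ _ hndA)
      · intro x
        rw [dict_getD_erase]
        by_cases hxc : x = candies[m]
        · subst hxc
          rw [if_pos rfl, hw]
          rw [if_pos rfl]
          push_cast
          omega
        · rw [if_neg hxc, PySem.Dict.getD_insert, if_neg hxc, hval, hw, if_neg (fun h => hxc h.symm)]
          push_cast
          ring
      · intro x
        rw [dict_keys_erase, List.mem_filter]
        by_cases hxc : x = candies[m]
        · subst hxc
          simp only [beq_self_eq_true, Bool.not_true, Bool.false_eq_true, and_false, false_iff]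
          rw [hw, if_pos rfl]
          omega
        · simp only [PySem.Dict.mem_keys_insert, hmemA]
          rw [hw, if_neg (fun h => hxc h.symm)]
          constructor
          · rintro ⟨(h | h), _⟩
            · exact absurd h hxc
            · omega
          · intro h
            exact ⟨Or.inr (by omega), by simp [hxc]⟩
    · rw [if_neg hz]
      refine ⟨?_, ?_, ?_⟩
      · exact PySem.Dict.nodup_keys_insert _ _ _ hndA
      · intro x
        rw [PySem.Dict.getD_insert]
        by_cases hxc : x = candies[m]
        · subst hxc
          rw [if_pos rfl, hw, if_pos rfl]
          push_cast
          ring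
        · rw [if_neg hxc, hval, hw, if_neg (fun h => hxc h.symm)]
          push_cast
          ring
      · intro x
        by_cases hxc : x = candies[m]
        · subst hxc
          simp only [PySem.Dict.mem_keys_insert]
          rw [hw, if_pos rfl]
          constructor
          · intro _
            omega
          · intro _
            tauto
        · simp only [PySem.Dict.mem_keys_insert, hmemA]
          rw [hw, if_neg (fun h => hxc h.symm)]
          constructor
          · rintro (h | h)
            · exact absurd h hxc
            · omega
          · intro h
            exact Or.inr (by omega)

-- ---------- B's first loop: first/last occurrence dicts ----------

lemma flStep_preserve (candies : List Int) (m : Nat) (hm : m < candies.length)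
    (first last : PySem.Dict Int Int) (h : FLInv candies m first last) :
    FLInv candies (m + 1) (flStep (first, last) ((m : Int), candies[m])).1
      (flStep (first, last) ((m : Int), candies[m])).2 := by
  obtain ⟨hnd, hmem, hfst, hlst⟩ := h
  have htake : candies.take (m + 1) = candies.take m ++ [candies[m]] := by
    rw [List.take_add_one, List.getElem?_eq_getElem hm, Option.toList_some]
  have hmem1 : ∀ x : Int, x ∈ candies.take (m + 1) ↔ x ∈ candies.take m ∨ x = candies[m] := by
    intro x; rw [htake, List.mem_append, List.mem_singleton]
  have hlenm : (candies.take m).length = m := by simp; omega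
  have hlast' : ∀ x ∈ candies.take (m + 1), ∃ j : Nat, j < m + 1 ∧
      (last.insert candies[m] (m : Int)).getD x 0 = (j : Int) ∧
      candies[j]? = some x ∧ ((candies.take (m + 1)).drop (j + 1)).count x = 0 := by
    intro x hx
    by_cases hxc : x = candies[m]
    · subst hxc
      refine ⟨m, by omega, PySem.Dict.getD_insert_self _ _ _ _, List.getElem?_eq_getElem hm, ?_⟩
      rw [List.drop_eq_nil_of_le (by simp)]
      simp
    · obtain ⟨j, hj, hg, hj2, hj3⟩ := hlst x ((hmem1 x).mp hx |>.resolve_right hxc)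
      refine ⟨j, by omega, ?_, hj2, ?_⟩
      · rw [PySem.Dict.getD_insert, if_neg hxc]; exact hg
      · rw [htake, List.drop_append_of_le_length (by rw [hlenm]; omega), List.count_append, hj3]
        rw [Nat.zero_add, List.count_eq_zero]
        simp [hxc]
  simp only [flStep]
  by_cases hc : first.contains candies[m] = true
  · have hcm : candies[m] ∈ candies.take m :=
      (hmem _).mp ((PySem.Dict.contains_iff_mem_keys _ _).mp hc)
    rw [if_pos hc]
    refine ⟨hnd, ?_, ?_, hlast'⟩
    · intro x
      rw [hmem, hmem1]
      constructor
      · exact Or.inl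
      · rintro (h | h)
        · exact h
        · subst h; exact hcm
    · intro x hx
      exact hfst x (((hmem1 x).mp hx).elim id (fun h => by rw [h]; exact hcm))
  · have hcm : candies[m] ∉ candies.take m := fun hmm =>
      hc ((PySem.Dict.contains_iff_mem_keys _ _).mpr ((hmem _).mpr hmm))
    rw [if_neg hc]
    refine ⟨PySem.Dict.nodup_keys_insert _ _ _ hnd, ?_, ?_, hlast'⟩
    · intro x
      rw [PySem.Dict.mem_keys_insert, hmem, hmem1]
      tauto
    · intro x hx
      by_cases hxc : x = candies[m]
      · subst hxc
        refine ⟨m, PySem.Dict.getD_insert_self _ _ _ _, List.getElem?_eq_getElem hm, ?_⟩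
        exact List.count_eq_zero.mpr hcm
      · obtain ⟨j, hg, hj2, hj3⟩ := hfst x (((hmem1 x).mp hx).resolve_right hxc)
        exact ⟨j, by rw [PySem.Dict.getD_insert, if_neg hxc]; exact hg, hj2, hj3⟩

lemma fl_loop (candies : List Int) :
    ∀ (rest : List Int) (m : Nat), candies.drop m = rest →
    ∀ (first last : PySem.Dict Int Int), FLInv candies m first last →
    FLFinal candies ((PySem.List.enumerate rest (m : Int)).foldl flStep (first, last)).1
      ((PySem.List.enumerate rest (m : Int)).foldl flStep (first, last)).2 := by
  intro rest
  induction rest with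
  | nil =>
    intro m hdrop first last h
    obtain ⟨hnd, hmem, hfst, hlst⟩ := h
    have hml : candies.length ≤ m := by
      have := List.drop_eq_nil_iff.mp hdrop
      omega
    have htk : candies.take m = candies := List.take_of_length_le hml
    rw [htk] at hmem hfst hlst
    refine ⟨hnd, hmem, hfst, ?_⟩
    simp only [PySem.List.enumerate_nil, List.foldl_nil]
    intro x hx
    obtain ⟨j, _, hg, hj2, hj3⟩ := hlst x hx
    exact ⟨j, hg, hj2, hj3⟩
  | cons c rest' ih =>
    intro m hdrop first last h
    have hm : m < candies.length := by
      have hne : candies.drop m ≠ [] := by rw [hdrop]; simp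
      rw [ne_eq, List.drop_eq_nil_iff] at hne
      omega
    have hdec := List.drop_eq_getElem_cons hm
    rw [hdrop] at hdec
    injection hdec with hc hrest
    subst hc
    rw [PySem.List.enumerate_cons, List.foldl_cons]
    have h' := flStep_preserve candies m hm first last h
    have hcast : (((m + 1 : Nat)) : Int) = (m : Int) + 1 := by push_cast; ring
    have hres := ih (m + 1) hrest.symm
      (flStep (first, last) ((m : Int), candies[m])).1
      (flStep (first, last) ((m : Int), candies[m])).2 h'
    rw [hcast] at hres
    exact hres

-- ---------- B's difference array: prefix sums count covering intervals ----------

lemma sum_take_set_add (l : List Int) (j : Nat) (v : Int) (m : Nat) (hj : j < l.length) :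
    ((l.set j (l[j] + v)).take m).sum = (l.take m).sum + if j < m then v else 0 := by
  induction l generalizing j m with
  | nil => simp at hj
  | cons a t ih =>
    cases j with
    | zero =>
      cases m with
      | zero => simp
      | succ m' => simp [List.take_succ_cons]; ring
    | succ j' =>
      cases m with
      | zero => simp
      | succ m' =>
        have hj' : j' < t.length := by simpa using hj
        simp only [List.set_cons_succ, List.getElem_cons_succ, List.take_succ_cons,
          List.sum_cons, Nat.succ_lt_succ_iff]
        rw [ih j' m' hj']
        ring

-- per-flavor side conditions used by the diff lemmas: the stored lo is a real index
def LoOk (candies : List Int) (last : PySem.Dict Int Int) (c : Int) : Prop :=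
  ∃ j : Nat, j < candies.length ∧ last.getD c 0 = (j : Int)

lemma diffStep_length (k n : Int) (first last : PySem.Dict Int Int) (diff : List Int) (c : Int) :
    (diffStep k n first last diff c).length = diff.length := by
  simp only [diffStep]
  split_ifs <;> simp [PySem.List.length_pySetD]

lemma diff_fold_length (k n : Int) (first last : PySem.Dict Int Int) :
    ∀ (keys : List Int) (diff : List Int),
      (keys.foldl (diffStep k n first last) diff).length = diff.length := by
  intro keys
  induction keys with
  | nil => intro diff; rfl
  | cons c ks ih =>
    intro diff
    rw [List.foldl_cons, ih, diffStep_length]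

lemma diffStep_sum (candies : List Int) (k : Int) (first last : PySem.Dict Int Int)
    (diff : List Int) (c : Int) (hlen : diff.length = candies.length + 1)
    (hlo : LoOk candies last c) (m : Nat) (hm : m < candies.length) :
    (((diffStep k (candies.length : Int) first last diff c).take (m + 1)).sum : Int)
      = ((diff.take (m + 1)).sum : Int) +
        (if last.getD c 0 ≤ (m : Int) ∧ (m : Int) ≤ first.getD c 0 + k - 1 then 1 else 0) := by
  obtain ⟨jl, hjl, hlo⟩ := hlo
  unfold diffStep
  by_cases hge : first.getD c 0 + k - 1 ≥ last.getD c 0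
  · rw [if_pos hge]
    have h1 : PySem.List.pySetD diff (last.getD c 0) (PySem.List.pyGetD diff (last.getD c 0) 0 + 1)
        = diff.set jl (diff[jl]'(by omega) + 1) := by
      rw [hlo, PySem.List.pySetD_natCast, PySem.List.pyGetD_natCast,
        List.getD_eq_getElem diff 0 (by omega)]
    rw [h1]
    have hs1 := sum_take_set_add diff jl 1 (m + 1) (by omega)
    by_cases hle : first.getD c 0 + k - 1 + 1 ≤ (candies.length : Int)
    · rw [if_pos hle]
      set diff1 := diff.set jl (diff[jl]'(by omega) + 1) with hd1
      have hlen1 : diff1.length = candies.length + 1 := by rw [hd1, List.length_set, hlen]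
      have hhi0 : (0 : Int) ≤ first.getD c 0 + k - 1 + 1 := by omega
      have hjh : ((first.getD c 0 + k - 1 + 1).toNat : Int) = first.getD c 0 + k - 1 + 1 :=
        Int.toNat_of_nonneg hhi0
      have hjhlt : (first.getD c 0 + k - 1 + 1).toNat < diff1.length := by
        rw [hlen1]; omega
      have h2 : PySem.List.pySetD diff1 (first.getD c 0 + k - 1 + 1)
            (PySem.List.pyGetD diff1 (first.getD c 0 + k - 1 + 1) 0 - 1)
          = diff1.set (first.getD c 0 + k - 1 + 1).toNat
              (diff1[(first.getD c 0 + k - 1 + 1).toNat]'hjhlt - 1) := by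
        rw [PySem.List.pySetD_of_nonneg diff1 _ (by omega), PySem.List.pyGetD_eq_getElem diff1 0 hhi0
          (by rw [hlen1]; push_cast; omega)]
      have h3 := sum_take_set_add diff1 ((first.getD c 0 + k - 1 + 1).toNat) (-1) (m + 1) hjhlt
      rw [show diff1[(first.getD c 0 + k - 1 + 1).toNat]'hjhlt + (-1)
          = diff1[(first.getD c 0 + k - 1 + 1).toNat]'hjhlt - 1 from by ring] at h3
      rw [h2, h3, hd1, hs1]
      have hc1 : jl < m + 1 ↔ last.getD c 0 ≤ (m : Int) := by rw [hlo]; omega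
      have hc2 : (first.getD c 0 + k - 1 + 1).toNat < m + 1 ↔
          ¬ ((m : Int) ≤ first.getD c 0 + k - 1) := by omega
      split_ifs with ha hb hc hb hc <;> omega
    · rw [if_neg hle, hs1]
      have hc1 : jl < m + 1 ↔ last.getD c 0 ≤ (m : Int) := by rw [hlo]; omega
      have hc2 : (m : Int) ≤ first.getD c 0 + k - 1 := by omega
      split_ifs with ha hb <;> omega
  · rw [if_neg hge]
    have : ¬ (last.getD c 0 ≤ (m : Int) ∧ (m : Int) ≤ first.getD c 0 + k - 1) := by omega
    rw [if_neg this]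
    ring

lemma diff_fold_sum (candies : List Int) (k : Int) (first last : PySem.Dict Int Int)
    (m : Nat) (hm : m < candies.length) :
    ∀ (keys : List Int), (∀ c ∈ keys, LoOk candies last c) →
    ∀ (diff : List Int), diff.length = candies.length + 1 →
    (((keys.foldl (diffStep k (candies.length : Int) first last) diff).take (m + 1)).sum : Int)
      = ((diff.take (m + 1)).sum : Int) +
        ((keys.filter (fun c => decide (last.getD c 0 ≤ (m : Int) ∧
            (m : Int) ≤ first.getD c 0 + k - 1))).length : Int) := by
  intro keys
  induction keys with
  | nil => intro _ diff _; simp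
  | cons c ks ih =>
    intro hok diff hlen
    rw [List.foldl_cons, List.filter_cons,
      ih (fun c hc => hok c (List.mem_cons_of_mem _ hc)) _
        (by rw [diffStep_length]; exact hlen),
      diffStep_sum candies k first last diff c hlen (hok c List.mem_cons_self) m hm]
    by_cases hc : last.getD c 0 ≤ (m : Int) ∧ (m : Int) ≤ first.getD c 0 + k - 1
    · rw [if_pos hc, if_pos (by simpa using hc), List.length_cons]
      push_cast
      ring
    · rw [if_neg hc, if_neg (by simpa using hc)]
      ring

-- ---------- fully-consumed characterization: interval [last, first+k-1] covers m ----------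

lemma full_iff (candies : List Int) (k : Int) (hk : 0 ≤ k) (x : Int)
    (f l m : Nat) (hm : m < candies.length)
    (hf1 : candies[f]? = some x) (hf2 : (candies.take f).count x = 0)
    (hl1 : candies[l]? = some x) (hl2 : (candies.drop (l + 1)).count x = 0) :
    (candies.count x ≤ winCnt candies k.toNat (m + 1) x)
      ↔ ((l : Int) ≤ (m : Int) ∧ (m : Int) ≤ (f : Int) + k - 1) := by
  have hkk : (k.toNat : Int) = k := Int.toNat_of_nonneg hk
  obtain ⟨hflt, hfx⟩ := List.getElem?_eq_some_iff.mp hf1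
  obtain ⟨hllt, hlx⟩ := List.getElem?_eq_some_iff.mp hl1
  have h1 : candies.count x = (candies.take (m + 1)).count x + (candies.drop (m + 1)).count x := by
    rw [← List.count_append, List.take_append_drop]
  have h2 : (candies.take (m + 1)).count x
      = (candies.take (m + 1 - k.toNat)).count x + winCnt candies k.toNat (m + 1) x := by
    have hsplit := List.take_append_drop (m + 1 - k.toNat) (candies.take (m + 1))
    have : (candies.take (m + 1)).count x
        = ((candies.take (m + 1)).take (m + 1 - k.toNat)).count x
          + ((candies.take (m + 1)).drop (m + 1 - k.toNat)).count x := by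
      rw [← List.count_append, hsplit]
    rw [this, List.take_take, Nat.min_eq_left (by omega)]
    rfl
  have hA2 : ((candies.drop (m + 1)).count x = 0) ↔ l ≤ m := by
    constructor
    · intro h
      by_contra hlm
      have hml : m + 1 ≤ l := by omega
      have hx1 : x ∈ candies.drop l := by
        rw [List.drop_eq_getElem_cons hllt, hlx]
        exact List.mem_cons_self
      have hsub : List.Sublist (candies.drop l) (candies.drop (m + 1)) := by
        conv_lhs => rw [← Nat.add_sub_cancel' hml]
        rw [← List.drop_drop]
        exact List.drop_sublist _ _
      have := List.count_pos_iff.mpr (hsub.mem hx1)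
      omega
    · intro hlm
      have hdd : candies.drop (m + 1) = (candies.drop (l + 1)).drop (m - l) := by
        rw [List.drop_drop]
        congr 1
        omega
      have hle : (candies.drop (m + 1)).count x ≤ (candies.drop (l + 1)).count x := by
        rw [hdd]
        exact List.Sublist.count_le x (List.drop_sublist _ _)
      omega
  have hA1 : ((candies.take (m + 1 - k.toNat)).count x = 0) ↔ m + 1 - k.toNat ≤ f := by
    constructor
    · intro h
      by_contra hff
      have hx1 : x ∈ candies.take (f + 1) := by
        rw [List.take_add_one, List.getElem?_eq_getElem hflt, hfx, Option.toList_some]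
        exact List.mem_append_right _ List.mem_cons_self
      have hsub : List.Sublist (candies.take (f + 1)) (candies.take (m + 1 - k.toNat)) := by
        have h := List.take_sublist (f + 1) (candies.take (m + 1 - k.toNat))
        rwa [List.take_take, Nat.min_eq_left (by omega)] at h
      have := List.count_pos_iff.mpr (hsub.mem hx1)
      omega
    · intro hf0
      have htt : candies.take (m + 1 - k.toNat) = (candies.take f).take (m + 1 - k.toNat) := by
        rw [List.take_take, Nat.min_eq_left hf0]
      have hle : (candies.take (m + 1 - k.toNat)).count x ≤ (candies.take f).count x := by
        rw [htt]
        exact List.Sublist.count_le x (List.take_sublist _ _)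
      omega
  constructor
  · intro h
    have hz : (candies.take (m + 1 - k.toNat)).count x = 0 ∧ (candies.drop (m + 1)).count x = 0 := by
      omega
    have hc1 := hA1.mp hz.1
    have hc2 := hA2.mp hz.2
    omega
  · intro ⟨hc1, hc2⟩
    have hz1 := hA1.mpr (by omega)
    have hz2 := hA2.mpr (by omega)
    omega

-- the B-side prefix sum equals remCnt
lemma prefix_eq_remCnt (candies : List Int) (k : Int) (hk : 0 ≤ k)
    (first last : PySem.Dict Int Int) (hFL : FLFinal candies first last)
    (m : Nat) (hm : m < candies.length) :
    ((first.keys.filter (fun c => decide (last.getD c 0 ≤ (m : Int) ∧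
        (m : Int) ≤ first.getD c 0 + k - 1))).length : Int)
      = (remCnt candies k.toNat (m + 1) : Int) := by
  obtain ⟨hnd, hkeys, hfst, hlst⟩ := hFL
  have hndf : (first.keys.filter (fun c => decide (last.getD c 0 ≤ (m : Int) ∧
      (m : Int) ≤ first.getD c 0 + k - 1))).Nodup := hnd.filter _
  rw [← List.toFinset_card_of_nodup hndf, List.toFinset_filter]
  have hkf : first.keys.toFinset = candies.toFinset := by
    ext a
    simp [hkeys a]
  rw [hkf]
  unfold remCnt
  rw [Nat.cast_inj]
  congr 1
  apply Finset.filter_congr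
  intro x hx
  have hxc : x ∈ candies := List.mem_toFinset.mp hx
  obtain ⟨jf, hgf, hjf2, hjf3⟩ := hfst x hxc
  obtain ⟨jl2, hgl, hjl2, hjl3⟩ := hlst x hxc
  rw [hgf, hgl]
  rw [decide_eq_true_iff]
  rw [full_iff candies k hk x jf jl2 m hm hjf2 hjf3 hjl2 hjl3]

-- ---------- the sweep, coupled with A's loop ----------

lemma sweep_couple (candies : List Int) (k : Int) (hk : 0 ≤ k) (diffL : List Int)
    (hlen : diffL.length = candies.length + 1)
    (hsum : ∀ m : Nat, m < candies.length →
      ((diffL.take (m + 1)).sum : Int) = (remCnt candies k.toNat (m + 1) : Int)) :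
    ∀ (rest : List Int) (m : Nat), candies.drop m = rest →
    ∀ (count : PySem.Dict Int Int) (ar removed : Int),
    InvA candies k.toNat m count → removed = ((diffL.take m).sum : Int) →
    ((PySem.List.enumerate rest (m : Int)).foldl (stepA candies k) (count, ar)).2
      = ((PySem.List.pyRange (m : Int) (candies.length : Int) 1).foldl
          (sweepStep k (candies.toFinset.card : Int) diffL) (removed, ar)).2 := by
  intro rest
  induction rest with
  | nil =>
    intro m hdrop count ar removed _ _
    have hml : candies.length ≤ m := by
      have := List.drop_eq_nil_iff.mp hdrop
      omega
    rw [PySem.List.pyRange_one_eq_nil (by exact_mod_cast Nat.cast_le.mpr hml)]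
    simp [PySem.List.enumerate_nil]
  | cons c rest' ih =>
    intro m hdrop count ar removed hA hrem
    have hm : m < candies.length := by
      have hne : candies.drop m ≠ [] := by rw [hdrop]; simp
      rw [ne_eq, List.drop_eq_nil_iff] at hne
      omega
    have hdec := List.drop_eq_getElem_cons hm
    rw [hdrop] at hdec
    injection hdec with hc hrest
    subst hc
    rw [PySem.List.enumerate_cons, List.foldl_cons,
      PySem.List.pyRange_one_cons (by exact_mod_cast Nat.cast_lt.mpr hm), List.foldl_cons]
    obtain ⟨hA', hans⟩ := stepA_preserve candies k hk m hm count ar hA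
    -- the B step
    have hmlen : m < diffL.length := by omega
    have hstep : (diffL.take (m + 1)).sum = (diffL.take m).sum + diffL[m]'hmlen := by
      rw [List.take_add_one, List.getElem?_eq_getElem hmlen, Option.toList_some,
        List.sum_append, List.sum_cons, List.sum_nil]
      ring
    have hBget : PySem.List.pyGetD diffL (m : Int) 0 = diffL[m]'hmlen := by
      rw [PySem.List.pyGetD_natCast, List.getD_eq_getElem diffL 0 hmlen]
    have hBpair : sweepStep k (candies.toFinset.card : Int) diffL (removed, ar) (m : Int)
        = ((remCnt candies k.toNat (m + 1) : Int),
           if (m : Int) ≥ k - 1 then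
             max ar ((candies.toFinset.card : Int) - (remCnt candies k.toNat (m + 1) : Int))
           else ar) := by
      simp only [sweepStep, hBget, hrem]
      rw [← hstep, hsum m hm]
    have hApair : stepA candies k (count, ar) ((m : Int), candies[m])
        = ((stepA candies k (count, ar) ((m : Int), candies[m])).1,
           if (m : Int) ≥ k - 1 then
             max ar ((candies.toFinset.card : Int) - (remCnt candies k.toNat (m + 1) : Int))
           else ar) := by
      rw [← hans]
    have hres := ih (m + 1) hrest.symm
      (stepA candies k (count, ar) ((m : Int), candies[m])).1
      (if (m : Int) ≥ k - 1 then
         max ar ((candies.toFinset.card : Int) - (remCnt candies k.toNat (m + 1) : Int))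
       else ar)
      ((remCnt candies k.toNat (m + 1) : Int)) hA' (hsum m hm).symm
    rw [show (((m + 1 : Nat)) : Int) = (m : Int) + 1 from by push_cast; ring] at hres
    rw [hApair, hBpair]
    exact hres

-- ===== VERDICT (by name: the statement is the Claim_ definition above) =====
theorem maxUniqueCandies_spec : Claim_equal_maxUniqueCandies := by
  intro candies k _ hpre
  unfold Spec_maxUniqueCandies
  by_cases hnil : candies = []
  · subst hnil
    simp [maxUniqueCandies, maxUniqueCandies_alt, PySem.List.enumerate_nil]
  · have hk : 0 ≤ k := hpre.resolve_right hnil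
    have hlen0 : candies.length ≠ 0 := by simpa [List.length_eq_zero_iff] using hnil
    have hne0 : ¬ ((candies.length : Int) = 0) := fun h => hlen0 (by exact_mod_cast h)
    unfold maxUniqueCandies
    simp only [maxUniqueCandies_alt]
    rw [if_neg hne0]
    set fl := (PySem.List.enumerate candies).foldl flStep (PySem.Dict.empty, PySem.Dict.empty)
      with hfl
    set diffL := fl.1.keys.foldl (diffStep k (candies.length : Int) fl.1 fl.2)
      (List.replicate (candies.length + 1) 0) with hdiff
    have h0 : FLInv candies 0 PySem.Dict.empty PySem.Dict.empty := by
      refine ⟨?_, ?_, ?_, ?_⟩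
      · simp [PySem.Dict.keys, PySem.Dict.empty]
      · intro x; simp [PySem.Dict.keys, PySem.Dict.empty]
      · intro x hx; simp at hx
      · intro x hx; simp at hx
    have hFL := fl_loop candies candies 0 rfl PySem.Dict.empty PySem.Dict.empty h0
    rw [Nat.cast_zero] at hFL
    rw [← hfl] at hFL
    obtain ⟨hndK, hkeysK, hfstK, hlstK⟩ := hFL
    have hD : ((fl.1.size : Nat) : Int) = (candies.toFinset.card : Int) := by
      rw [dict_size_eq_keys_length, ← List.toFinset_card_of_nodup hndK]
      exact_mod_cast congrArg Finset.card (by ext a; simp [hkeysK a] :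
        fl.1.keys.toFinset = candies.toFinset)
    have hlenD : diffL.length = candies.length + 1 := by
      rw [hdiff, diff_fold_length]; simp
    have hok : ∀ c ∈ fl.1.keys, LoOk candies fl.2 c := by
      intro c hc
      obtain ⟨j, hg, hj2, _⟩ := hlstK c ((hkeysK c).mp hc)
      exact ⟨j, (List.getElem?_eq_some_iff.mp hj2).1, hg⟩
    have hsum : ∀ m : Nat, m < candies.length →
        ((diffL.take (m + 1)).sum : Int) = (remCnt candies k.toNat (m + 1) : Int) := by
      intro m hm
      rw [hdiff, diff_fold_sum candies k fl.1 fl.2 m hm fl.1.keys hok _ (by simp)]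
      have hrep : ((List.replicate (candies.length + 1) (0 : Int)).take (m + 1)).sum = 0 := by
        rw [List.take_replicate]; simp
      rw [hrep, zero_add]
      exact prefix_eq_remCnt candies k hk fl.1 fl.2 ⟨hndK, hkeysK, hfstK, hlstK⟩ m hm
    have hA0 : InvA candies k.toNat 0 (PySem.Dict.counter candies) := by
      refine ⟨PySem.Dict.nodup_keys_counter candies, ?_, ?_⟩
      · intro x
        rw [PySem.Dict.getD_counter, winCnt_zero]
        simp
      · intro x
        rw [PySem.Dict.keys_counter, winCnt_zero]
        constructor
        · intro hx
          exact List.count_pos_iff.mpr ((PySem.Set.mem_ofList candies x).mp hx)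
        · intro hx
          exact (PySem.Set.mem_ofList candies x).mpr (List.count_pos_iff.mp hx)
    have hcouple := sweep_couple candies k hk diffL hlenD hsum candies 0 rfl
      (PySem.Dict.counter candies) 0 0 hA0 (by simp)
    rw [Nat.cast_zero] at hcouple
    rw [hD]
    exact hcouple
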